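-- pv_equiv track=rewrite | github.com/sinoath/adventCode2024 | day13/python/main.py | coinSpend
-- ===== SOURCE A (Python) =====
-- def coinSpend(aButton, bButton, prize):
--     '''Return how many times, if any, buttons have to be presed
--     to reach the prize'''
--     sumX = 0
--     sumY = 0
--     results = []
--     for a in range(101):
--         sumX = a * aButton[0]
--         for b in range(101):
--             sumY = b * bButton[0]
--             if sumX + sumY == prize[0]:
--                 if (a * aButton[1] + b * bButton[1]) == prize[1]:
--                     results.append([a, b])
--     return results
-- ===== SOURCE B (Python) =====
-- def coinSpend(aButton, bButton, prize):
--     '''Return how many times, if any, buttons have to be presed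
--     to reach the prize'''
--     ax, ay = aButton[0], aButton[1]
--     bx, by = bButton[0], bButton[1]
--     px, py = prize[0], prize[1]
--     results = []
--     for a in range(101):
--         rx = px - a * ax
--         ry = py - a * ay
--         if bx != 0:
--             q, r = divmod(rx, bx)
--             if r == 0 and 0 <= q <= 100 and q * by == ry:
--                 results.append([a, q])
--         elif by != 0:
--             q, r = divmod(ry, by)
--             if r == 0 and 0 <= q <= 100 and rx == 0:
--                 results.append([a, q])
--         else:
--             if rx == 0 and ry == 0:
--                 results.extend([a, b] for b in range(101))
--     return results
-- ===== Notes on version B (the rewrite author's own statement) =====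
-- stated objective: alternative
-- what changed: The inner 101-iteration scan over b is replaced by solving b directly from the equations with divmod (per a: one divisibility check, or a full b-range only in the doubly-degenerate bButton=[0,0] case), keeping the single outer loop over a.
-- outside the precondition, e.g. on coinSpend([1], [1], [300]): A returns [], B raises IndexError
import Mathlib
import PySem

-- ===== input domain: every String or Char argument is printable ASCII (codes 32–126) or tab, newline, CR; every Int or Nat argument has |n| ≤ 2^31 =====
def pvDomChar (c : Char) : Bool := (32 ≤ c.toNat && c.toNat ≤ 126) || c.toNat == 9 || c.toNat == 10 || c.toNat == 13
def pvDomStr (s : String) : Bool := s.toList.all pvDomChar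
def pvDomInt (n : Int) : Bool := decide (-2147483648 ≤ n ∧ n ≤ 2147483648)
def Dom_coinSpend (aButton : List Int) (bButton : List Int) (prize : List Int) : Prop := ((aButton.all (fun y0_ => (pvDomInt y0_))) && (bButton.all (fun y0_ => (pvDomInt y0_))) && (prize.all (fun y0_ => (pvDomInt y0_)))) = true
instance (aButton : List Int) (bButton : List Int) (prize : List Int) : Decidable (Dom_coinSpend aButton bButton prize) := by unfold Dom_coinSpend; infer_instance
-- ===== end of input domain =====

-- B replaces A's inner 101-iteration scan over b by solving for b directly with divmod
-- (one divisibility check per a; a full b-range only when bButton = [0,0]).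

-- ===== PORT A =====
def coinSpend (aButton : List Int) (bButton : List Int) (prize : List Int) : List (List Int) :=
  (PySem.List.pyRange 0 101 1).foldl (fun results a =>
    let sumX := a * PySem.List.pyGetD aButton 0 0
    (PySem.List.pyRange 0 101 1).foldl (fun results b =>
      let sumY := b * PySem.List.pyGetD bButton 0 0
      if sumX + sumY = PySem.List.pyGetD prize 0 0 then
        if a * PySem.List.pyGetD aButton 1 0 + b * PySem.List.pyGetD bButton 1 0
            = PySem.List.pyGetD prize 1 0 then
          results ++ [[a, b]]
        else results
      else results) results) []

-- ===== PORT B =====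
def coinSpend_alt (aButton : List Int) (bButton : List Int) (prize : List Int) : List (List Int) :=
  let ax := PySem.List.pyGetD aButton 0 0
  let ay := PySem.List.pyGetD aButton 1 0
  let bx := PySem.List.pyGetD bButton 0 0
  let b_y := PySem.List.pyGetD bButton 1 0
  let px := PySem.List.pyGetD prize 0 0
  let py := PySem.List.pyGetD prize 1 0
  (PySem.List.pyRange 0 101 1).foldl (fun results a =>
    let rx := px - a * ax
    let ry := py - a * ay
    if bx ≠ 0 then
      let q := PySem.Int.floordiv rx bx
      let r := PySem.Int.mod rx bx
      if r = 0 ∧ 0 ≤ q ∧ q ≤ 100 ∧ q * b_y = ry then results ++ [[a, q]] else results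
    else if b_y ≠ 0 then
      let q := PySem.Int.floordiv ry b_y
      let r := PySem.Int.mod ry b_y
      if r = 0 ∧ 0 ≤ q ∧ q ≤ 100 ∧ rx = 0 then results ++ [[a, q]] else results
    else
      if rx = 0 ∧ ry = 0 then
        results ++ (PySem.List.pyRange 0 101 1).map (fun b => [a, b])
      else results) []

-- ===== PRECONDITION & SPEC =====
-- Pre_ excludes lists shorter than 2, on which the Python A raises IndexError whenever the
-- scan reaches a missing element (and otherwise returns [] only by short-circuiting past it).
def Pre_coinSpend (aButton : List Int) (bButton : List Int) (prize : List Int) : Prop :=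
  2 ≤ aButton.length ∧ 2 ≤ bButton.length ∧ 2 ≤ prize.length
instance (aButton : List Int) (bButton : List Int) (prize : List Int) : Decidable (Pre_coinSpend aButton bButton prize) := by unfold Pre_coinSpend; infer_instance

def pvWitness_coinSpend : List Int × List Int × List Int := ([94, 22], [34, 67], [8400, 5400])

def Spec_coinSpend (aButton : List Int) (bButton : List Int) (prize : List Int) (out : List (List Int)) : Prop := out = coinSpend_alt aButton bButton prize
instance (aButton : List Int) (bButton : List Int) (prize : List Int) (out : List (List Int)) : Decidable (Spec_coinSpend aButton bButton prize out) := by unfold Spec_coinSpend; infer_instance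

-- ===== CLAIM (what is proved, stated in full; the proofs are below) =====
def Claim_equal_coinSpend : Prop := ∀ (aButton : List Int) (bButton : List Int) (prize : List Int), Dom_coinSpend aButton bButton prize → Pre_coinSpend aButton bButton prize → Spec_coinSpend aButton bButton prize (coinSpend aButton bButton prize)

-- ===== LEMMAS AND PROOFS =====

-- filter of a duplicate-free list by a predicate with at most one possible solution q
lemma filter_unique {l : List Int} (hl : l.Nodup) (p : Int → Bool) (q : Int)
    (h : ∀ b ∈ l, p b = true → b = q) :
    l.filter p = if q ∈ l ∧ p q = true then [q] else [] := by
  induction l with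
  | nil => simp
  | cons x xs ih =>
    rcases List.nodup_cons.mp hl with ⟨hx, hxs⟩
    by_cases hp : p x = true
    · have hxq : x = q := h x (by simp) hp
      subst hxq
      have hnil : xs.filter p = [] := by
        rw [List.filter_eq_nil_iff]
        intro b hb hpb
        exact absurd ((h b (by simp [hb]) hpb) ▸ hb) hx
      simp [hp, hnil]
    · have hih : xs.filter p = if q ∈ xs ∧ p q = true then [q] else [] :=
        ih hxs (fun b hb hpb => h b (by simp [hb]) hpb)
      rw [List.filter_cons, if_neg (by simp [hp]), hih]
      by_cases hq : q ∈ xs ∧ p q = true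
      · rw [if_pos hq, if_pos ⟨by simp [hq.1], hq.2⟩]
      · rw [if_neg hq, if_neg]
        rintro ⟨hmem, hpq⟩
        rcases List.mem_cons.mp hmem with rfl | hmem'
        · exact hp hpq
        · exact hq ⟨hmem', hpq⟩

-- exact division: if b * d = n (d ≠ 0) then n % d = 0 and b = n // d
lemma exact_div_mod {n d b : Int} (hd : d ≠ 0) (hb : b * d = n) :
    PySem.Int.mod n d = 0 ∧ PySem.Int.floordiv n d = b := by
  have hdvd : d ∣ n := ⟨b, by linarith [hb]⟩
  have hm : PySem.Int.mod n d = 0 := (PySem.Int.mod_eq_zero_iff_dvd n d).mpr hdvd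
  have hfd := PySem.Int.floordiv_mul_add_mod n d
  have hmc : PySem.Int.floordiv n d * d = b * d := by rw [hb]; linarith [hfd, hm]
  exact ⟨hm, mul_right_cancel₀ hd hmc⟩

-- the inner b-loop of A collects exactly the b in [0,100] solving both equations
lemma innerA_eq (ax ay bx b_y px py a : Int) (res : List (List Int)) :
    (PySem.List.pyRange 0 101 1).foldl (fun results b =>
      if a * ax + b * bx = px then
        if a * ay + b * b_y = py then results ++ [[a, b]] else results
      else results) res
    = res ++ ((PySem.List.pyRange 0 101 1).filter
        (fun b => decide (b * bx = px - a * ax ∧ b * b_y = py - a * ay))).map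
        (fun b => [a, b]) := by
  refine Eq.trans (PySem.List.foldl_congr_mem
      _ _ (fun results b =>
        if (b * bx = px - a * ax ∧ b * b_y = py - a * ay) then results ++ [[a, b]] else results)
      _ ?_) (PySem.List.foldl_append_ite _ _ _ _)
  · intro acc b _
    have h1 : (a * ax + b * bx = px) ↔ (b * bx = px - a * ax) := by
      constructor <;> intro h <;> linarith
    have h2 : (a * ay + b * b_y = py) ↔ (b * b_y = py - a * ay) := by
      constructor <;> intro h <;> linarith
    simp only [h1, h2, ← ite_and]

-- filtering [0,100] for a unique-solution pair b·d = n ∧ b·e = m  (d ≠ 0)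
lemma filter_solve (d e n m : Int) (hd : d ≠ 0) :
    ((PySem.List.pyRange 0 101 1).filter
        (fun b => decide (b * d = n ∧ b * e = m)))
    = if PySem.Int.mod n d = 0 ∧ 0 ≤ PySem.Int.floordiv n d ∧ PySem.Int.floordiv n d ≤ 100 ∧
          PySem.Int.floordiv n d * e = m
      then [PySem.Int.floordiv n d] else [] := by
  set q := PySem.Int.floordiv n d with hq
  have huniq : ∀ b ∈ PySem.List.pyRange 0 101 1,
      (fun b => decide (b * d = n ∧ b * e = m)) b = true → b = q := by
    intro b _ hb
    rcases of_decide_eq_true hb with ⟨h1, _⟩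
    exact ((exact_div_mod hd h1).2).symm
  rw [filter_unique (PySem.List.nodup_pyRange_one 0 101) _ q huniq]
  by_cases hc : PySem.Int.mod n d = 0 ∧ 0 ≤ q ∧ q ≤ 100 ∧ q * e = m
  · rw [if_pos hc, if_pos]
    refine ⟨(PySem.List.mem_pyRange_one).mpr ⟨hc.2.1, by omega⟩, ?_⟩
    have hfd := PySem.Int.floordiv_mul_add_mod n d
    refine decide_eq_true ⟨?_, hc.2.2.2⟩
    linarith [hc.1, hfd]
  · rw [if_neg hc, if_neg]
    rintro ⟨hmem, hpq⟩
    rcases of_decide_eq_true hpq with ⟨h1, h2⟩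
    rcases (PySem.List.mem_pyRange_one).mp hmem with ⟨hlo, hhi⟩
    have he := exact_div_mod hd h1
    exact hc ⟨he.1, by omega, by omega, h2⟩

-- per-a: A's inner loop equals B's solved block
lemma block_eq (ax ay bx b_y px py : Int) (res : List (List Int)) (a : Int) :
    (PySem.List.pyRange 0 101 1).foldl (fun results b =>
      if a * ax + b * bx = px then
        if a * ay + b * b_y = py then results ++ [[a, b]] else results
      else results) res
    = (if bx ≠ 0 then
         if PySem.Int.mod (px - a * ax) bx = 0 ∧ 0 ≤ PySem.Int.floordiv (px - a * ax) bx ∧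
             PySem.Int.floordiv (px - a * ax) bx ≤ 100 ∧
             PySem.Int.floordiv (px - a * ax) bx * b_y = py - a * ay
         then res ++ [[a, PySem.Int.floordiv (px - a * ax) bx]] else res
       else if b_y ≠ 0 then
         if PySem.Int.mod (py - a * ay) b_y = 0 ∧ 0 ≤ PySem.Int.floordiv (py - a * ay) b_y ∧
             PySem.Int.floordiv (py - a * ay) b_y ≤ 100 ∧ px - a * ax = 0
         then res ++ [[a, PySem.Int.floordiv (py - a * ay) b_y]] else res
       else
         if px - a * ax = 0 ∧ py - a * ay = 0 then
           res ++ (PySem.List.pyRange 0 101 1).map (fun b => [a, b])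
         else res) := by
  rw [innerA_eq]
  by_cases hbx : bx ≠ 0
  · rw [if_pos hbx, filter_solve bx b_y (px - a * ax) (py - a * ay) hbx]
    split_ifs with h
    · simp
    · simp
  · rw [not_not] at hbx
    subst hbx
    rw [if_neg (by simp)]
    by_cases hby : b_y ≠ 0
    · rw [if_pos hby]
      by_cases hrx : px - a * ax = 0
      · have hcong : (PySem.List.pyRange 0 101 1).filter
            (fun b => decide (b * 0 = px - a * ax ∧ b * b_y = py - a * ay))
            = (PySem.List.pyRange 0 101 1).filter
            (fun b => decide (b * b_y = py - a * ay ∧ b * 0 = 0)) := by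
          apply List.filter_congr
          intro b _
          simp [hrx, and_comm]
        rw [hcong, filter_solve b_y 0 (py - a * ay) 0 hby]
        split_ifs with h1 h2 h2
        · simp
        · exact absurd ⟨h1.1, h1.2.1, h1.2.2.1, hrx⟩ h2
        · rcases h2 with ⟨hm, hq1, hq2, _⟩
          exact absurd ⟨hm, hq1, hq2, by ring⟩ h1
        · simp
      · have hnil : (PySem.List.pyRange 0 101 1).filter
            (fun b => decide (b * 0 = px - a * ax ∧ b * b_y = py - a * ay)) = [] := by
          rw [List.filter_eq_nil_iff]
          intro b _ hb
          rcases of_decide_eq_true hb with ⟨h1, _⟩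
          exact hrx (by linarith [h1])
        rw [hnil, if_neg (fun h => hrx h.2.2.2)]
        simp
    · rw [not_not] at hby
      subst hby
      rw [if_neg (by simp)]
      by_cases hc : px - a * ax = 0 ∧ py - a * ay = 0
      · have hall : (PySem.List.pyRange 0 101 1).filter
            (fun b => decide (b * 0 = px - a * ax ∧ b * 0 = py - a * ay))
            = PySem.List.pyRange 0 101 1 := by
          apply List.filter_eq_self.mpr
          intro b _
          exact decide_eq_true ⟨by rw [mul_zero]; omega, by rw [mul_zero]; omega⟩
        rw [hall, if_pos hc]
      · have hnil : (PySem.List.pyRange 0 101 1).filter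
            (fun b => decide (b * 0 = px - a * ax ∧ b * 0 = py - a * ay)) = [] := by
          rw [List.filter_eq_nil_iff]
          intro b _ hb
          rcases of_decide_eq_true hb with ⟨h1, h2⟩
          exact hc ⟨by linarith [h1], by linarith [h2]⟩
        rw [hnil, if_neg hc]
        simp

-- ===== VERDICT (by name: the statement is the Claim_ definition above) =====
theorem coinSpend_spec : Claim_equal_coinSpend := by
  intro aButton bButton prize _ _
  simp only [Spec_coinSpend, coinSpend, coinSpend_alt]
  exact PySem.List.foldl_congr_mem _ _ _ _ (fun res a _ =>
    block_eq (PySem.List.pyGetD aButton 0 0) (PySem.List.pyGetD aButton 1 0)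
      (PySem.List.pyGetD bButton 0 0) (PySem.List.pyGetD bButton 1 0)
      (PySem.List.pyGetD prize 0 0) (PySem.List.pyGetD prize 1 0) res a)
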